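-- pv_equiv track=rewrite | github.com/anushkumarv/leetcode | graphs/earliest_moment_everyone_become_friends.py | earliestAcq
-- ===== SOURCE A (Python) =====
-- from typing import List
--
-- class UnionFind:
--     def __init__(self,n):
--         self.par = {}
--         self.rank = {}
--         for i in range(n):
--             self.par[i] = i
--             self.rank[i] = 1
--
--     def find(self, n):
--         p = self.par[n]
--         while p != self.par[p]:
--             self.par[p] = self.par[self.par[p]]
--             p = self.par[p]
--         return p
--
--     def union(self, n1, n2):
--         p1, p2 = self.find(n1), self.find(n2)
--         if p1 == p2:
--             return False
--         else:
--             if self.rank[p1] > self.rank[p2]: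
--                 self.par[p2] = p1
--             elif self.rank[p2] > self.rank[p1]:
--                 self.par[p1] = p2
--             else:
--                 self.par[p2] = p1
--                 self.rank[p1] += 1
--         return True
--
-- def earliestAcq(logs: List[List[int]], n: int) -> int:
--     logs.sort(key=lambda item: item[0])
--     uf = UnionFind(n)
--     group_count = n
--     for time, n1, n2 in logs:
--         if uf.union(n1,n2):
--             group_count -= 1
--
--         if group_count == 1:
--             return time
--
--     return -1
-- ===== SOURCE B (Python) =====
-- from typing import List
--
-- def earliestAcq(logs: List[List[int]], n: int) -> int:
--     logs.sort(key=lambda item: item[0])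
--     comp = {i: i for i in range(n)}
--     group_count = n
--     for time, a, b in logs:
--         c1, c2 = comp[a], comp[b]
--         if c1 != c2:
--             comp = {k: (c1 if v == c2 else v) for k, v in comp.items()}
--             group_count -= 1
--         if group_count == 1:
--             return time
--     return -1
-- ===== Notes on version B (the rewrite author's own statement) =====
-- stated objective: alternative
-- what changed: Replaces the rank/path-halving union-find parent forest with a flat node-to-component-label dict: a merge relabels every node of the absorbed component in one dict comprehension instead of linking roots and chasing parent pointers.
import Mathlib
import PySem

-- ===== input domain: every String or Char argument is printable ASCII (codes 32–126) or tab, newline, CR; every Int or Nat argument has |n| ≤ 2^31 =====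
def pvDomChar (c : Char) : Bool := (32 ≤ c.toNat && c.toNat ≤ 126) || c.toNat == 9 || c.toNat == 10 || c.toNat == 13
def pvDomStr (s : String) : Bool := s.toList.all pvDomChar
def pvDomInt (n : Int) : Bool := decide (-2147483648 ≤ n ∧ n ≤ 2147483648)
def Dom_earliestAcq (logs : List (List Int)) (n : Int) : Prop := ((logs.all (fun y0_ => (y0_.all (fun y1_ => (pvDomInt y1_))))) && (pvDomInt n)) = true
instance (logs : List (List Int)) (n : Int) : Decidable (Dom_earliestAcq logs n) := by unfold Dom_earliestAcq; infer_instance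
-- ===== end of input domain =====

-- B replaces A's rank/path-halving union-find forest with a flat component-label dict merged by
-- relabelling (an alternative of similar cost); both sort `logs` in place identically in Python,
-- and the theorems are about the return value.

-- ===== PORT A =====
-- UnionFind.find: p = par[n]; while p != par[p]: par[p] = par[par[p]]; p = par[p]; return p
-- (fuel-bounded while loop; under Pre_ the parent map is a forest on n nodes, so fuel n.toNat
-- suffices — proved by the invariant below)
def pvFindGo : Nat → Int → Std.HashMap Int Int → Int × Std.HashMap Int Int
  | 0, p, par => (p, par)
  | f + 1, p, par =>
    if p = par.getD p 0 then (p, par)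
    else
      let g := par.getD (par.getD p 0) 0
      pvFindGo f g (par.insert p g)

def pvFind (par : Std.HashMap Int Int) (nd : Int) (fuel : Nat) : Int × Std.HashMap Int Int :=
  pvFindGo fuel (par.getD nd 0) par

-- UnionFind.union, returning (changed, par, rank)
def pvUnion (par rank : Std.HashMap Int Int) (n1 n2 : Int) (fuel : Nat) :
    Bool × Std.HashMap Int Int × Std.HashMap Int Int :=
  let r1 := pvFind par n1 fuel
  let r2 := pvFind r1.2 n2 fuel
  let p1 := r1.1
  let p2 := r2.1
  if p1 = p2 then (false, r2.2, rank)
  else if rank.getD p1 0 > rank.getD p2 0 then (true, r2.2.insert p2 p1, rank)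
  else if rank.getD p2 0 > rank.getD p1 0 then (true, r2.2.insert p1 p2, rank)
  else (true, r2.2.insert p2 p1, rank.insert p1 (rank.getD p1 0 + 1))

-- the for-loop over the sorted logs (a log that is not a 3-list raises in Python: outside Pre_)
def pvLoopA (fuel : Nat) : List (List Int) → Std.HashMap Int Int → Std.HashMap Int Int → Int → Int
  | [], _, _, _ => -1
  | l :: rest, par, rank, gc =>
    match l with
    | [t, a, b] =>
      let u := pvUnion par rank a b fuel
      let gc' := if u.1 then gc - 1 else gc
      if gc' = 1 then t else pvLoopA fuel rest u.2.1 u.2.2 gc'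
    | _ => -1

def earliestAcq (logs : List (List Int)) (n : Int) : Int :=
  let L := PySem.List.sorted logs (fun item => PySem.List.pyGetD item 0 0) false
  let init := (PySem.List.pyRange 0 n 1).foldl
    (fun (pr : Std.HashMap Int Int × Std.HashMap Int Int) i => (pr.1.insert i i, pr.2.insert i 1))
    ((∅ : Std.HashMap Int Int), (∅ : Std.HashMap Int Int))
  pvLoopA n.toNat L init.1 init.2 n

-- ===== PORT B =====
-- comp = {k: (c1 if v == c2 else v) for k, v in comp.items()}
def pvRelabel (comp : Std.HashMap Int Int) (c1 c2 : Int) : Std.HashMap Int Int :=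
  comp.toList.foldl (fun d p => d.insert p.1 (if p.2 = c2 then c1 else p.2)) (∅ : Std.HashMap Int Int)

def pvLoopB : List (List Int) → Std.HashMap Int Int → Int → Int
  | [], _, _ => -1
  | l :: rest, comp, gc =>
    match l with
    | [t, a, b] =>
      let c1 := comp.getD a 0
      let c2 := comp.getD b 0
      if c1 ≠ c2 then
        let gc' := gc - 1
        if gc' = 1 then t else pvLoopB rest (pvRelabel comp c1 c2) gc'
      else
        if gc = 1 then t else pvLoopB rest comp gc
    | _ => -1

def earliestAcq_alt (logs : List (List Int)) (n : Int) : Int :=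
  let L := PySem.List.sorted logs (fun item => PySem.List.pyGetD item 0 0) false
  let comp := (PySem.List.pyRange 0 n 1).foldl (fun (d : Std.HashMap Int Int) i => d.insert i i)
    (∅ : Std.HashMap Int Int)
  pvLoopB L comp n

-- ===== PRECONDITION & SPEC =====
-- Pre_: every log is a 3-list [t, a, b] with a, b in range(n) — exactly the inputs on which
-- Python A returns normally (otherwise it raises ValueError on tuple unpacking / IndexError in
-- the sort key / KeyError in the union-find dicts).
def Pre_earliestAcq (logs : List (List Int)) (n : Int) : Prop :=
  ∀ l ∈ logs, l.length = 3 ∧ 0 ≤ l.getD 1 0 ∧ l.getD 1 0 < n ∧ 0 ≤ l.getD 2 0 ∧ l.getD 2 0 < n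
instance (logs : List (List Int)) (n : Int) : Decidable (Pre_earliestAcq logs n) := by
  unfold Pre_earliestAcq; infer_instance

def pvWitness_earliestAcq : List (List Int) × Int := ([[3, 0, 1], [1, 1, 2], [2, 0, 2]], 4)

def Spec_earliestAcq (logs : List (List Int)) (n : Int) (out : Int) : Prop := out = earliestAcq_alt logs n
instance (logs : List (List Int)) (n : Int) (out : Int) : Decidable (Spec_earliestAcq logs n out) := by unfold Spec_earliestAcq; infer_instance

-- ===== CLAIM (what is proved, stated in full; the proofs are below) =====
def Claim_equal_earliestAcq : Prop := ∀ (logs : List (List Int)) (n : Int), Dom_earliestAcq logs n → Pre_earliestAcq logs n → Spec_earliestAcq logs n (earliestAcq logs n)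

-- ===== LEMMAS AND PROOFS =====
-- The equivalence is proved through a bisimulation: A's parent forest `par` (as the lookup
-- function pvPD par) and B's label map `comp` induce the same partition of range(n) at every
-- step (pvInv), with a depth measure bounded by component sizes certifying that A's find
-- terminates within its fuel.

def pvPD (d : Std.HashMap Int Int) : Int → Int := fun i => d.getD i 0

def pvNd (n i : Int) : Prop := 0 ≤ i ∧ i < n

def pvRootF (P : Int → Int) : Nat → Int → Int
  | 0, p => p
  | f + 1, p => if P p = p then p else pvRootF P f (P p)

def pvRoot (n : Int) (P : Int → Int) (p : Int) : Int := pvRootF P n.toNat p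

def pvGoodP (n : Int) (μ : Int → Nat) (P : Int → Int) : Prop :=
  (∀ q, pvNd n q → pvNd n (P q)) ∧ (∀ q, pvNd n q → P q = q ∨ μ (P q) < μ q)

lemma rootF_of_fix (P : Int → Int) (f : Nat) (p : Int) (h : P p = p) : pvRootF P f p = p := by
  cases f <;> simp [pvRootF, h]

lemma rootF_irrel {n : Int} {μ : Int → Nat} {P : Int → Int} (hg : pvGoodP n μ P) :
    ∀ (f1 f2 : Nat) (p : Int), pvNd n p → μ p < f1 → μ p < f2 →
      pvRootF P f1 p = pvRootF P f2 p := by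
  intro f1
  induction f1 with
  | zero => intro f2 p _ h1 _; omega
  | succ g ih =>
    intro f2 p hp h1 h2
    obtain ⟨h2', rfl⟩ : ∃ h, f2 = h + 1 := ⟨f2 - 1, by omega⟩
    by_cases hfix : P p = p
    · simp [pvRootF, hfix]
    · simp only [pvRootF, if_neg hfix]
      rcases hg.2 p hp with h | hlt
      · exact absurd h hfix
      · exact ih _ (P p) (hg.1 p hp) (by omega) (by omega)

lemma root_step {n : Int} {μ : Int → Nat} {P : Int → Int} (hg : pvGoodP n μ P)
    (htop : ∀ q, pvNd n q → μ q < n.toNat) (p : Int) (hp : pvNd n p) :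
    pvRoot n P p = pvRoot n P (P p) := by
  by_cases hfix : P p = p
  · rw [hfix]
  · rcases hg.2 p hp with h | hlt
    · exact absurd h hfix
    · have h1 : pvRoot n P p = pvRootF P (μ p + 1) p :=
        rootF_irrel hg _ _ p hp (htop p hp) (by omega)
      rw [h1]
      simp only [pvRootF, if_neg hfix]
      exact rootF_irrel hg _ _ (P p) (hg.1 p hp) (by omega) (htop _ (hg.1 p hp))

lemma root_fix {n : Int} {μ : Int → Nat} {P : Int → Int} (hg : pvGoodP n μ P)
    (htop : ∀ q, pvNd n q → μ q < n.toNat) :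
    ∀ (k : Nat) (p : Int), μ p ≤ k → pvNd n p →
      pvNd n (pvRoot n P p) ∧ P (pvRoot n P p) = pvRoot n P p := by
  intro k
  induction k with
  | zero =>
    intro p hk hp
    rcases hg.2 p hp with hfix | hlt
    · have : pvRoot n P p = p := rootF_of_fix P _ p hfix
      rw [this]; exact ⟨hp, hfix⟩
    · omega
  | succ k ih =>
    intro p hk hp
    rcases hg.2 p hp with hfix | hlt
    · have : pvRoot n P p = p := rootF_of_fix P _ p hfix
      rw [this]; exact ⟨hp, hfix⟩
    · rw [root_step hg htop p hp]
      exact ih (P p) (by omega) (hg.1 p hp)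

-- the root is a fixpoint and a node
lemma root_spec {n : Int} {μ : Int → Nat} {P : Int → Int} (hg : pvGoodP n μ P)
    (htop : ∀ q, pvNd n q → μ q < n.toNat) (p : Int) (hp : pvNd n p) :
    pvNd n (pvRoot n P p) ∧ P (pvRoot n P p) = pvRoot n P p :=
  root_fix hg htop (μ p) p le_rfl hp

lemma root_of_fix {n : Int} {P : Int → Int} {p : Int} (h : P p = p) : pvRoot n P p = p :=
  rootF_of_fix P _ p h

-- path-halving step: replacing P p by its grandparent preserves GoodP (same μ) and all roots
lemma upd_spec {n : Int} {μ : Int → Nat} {P : Int → Int} (hg : pvGoodP n μ P)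
    (htop : ∀ q, pvNd n q → μ q < n.toNat) {p : Int} (hp : pvNd n p) (hne : P p ≠ p) :
    pvGoodP n μ (Function.update P p (P (P p))) ∧
      (∀ q, pvNd n q → pvRoot n (Function.update P p (P (P p))) q = pvRoot n P q) := by
  have hlt : μ (P p) < μ p := (hg.2 p hp).resolve_left hne
  have hPp : pvNd n (P p) := hg.1 p hp
  have hg2 : μ (P (P p)) < μ p := by
    rcases hg.2 (P p) hPp with h | h
    · rw [h]; omega
    · omega
  set g := P (P p) with hgdef
  set P' := Function.update P p g with hP'def
  have hP'app : ∀ q, P' q = if q = p then g else P q := fun q => Function.update_apply P p g q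
  have hgood : pvGoodP n μ P' := by
    constructor
    · intro q hq
      rw [hP'app q]
      split
      · exact hg.1 _ hPp
      · exact hg.1 q hq
    · intro q hq
      rw [hP'app q]
      by_cases hqp : q = p
      · subst hqp; right; simpa using hg2
      · simp only [if_neg hqp]; exact hg.2 q hq
  have htop' : ∀ q, pvNd n q → μ q < n.toNat := htop
  refine ⟨hgood, ?_⟩
  -- strong induction on μ q
  have main : ∀ (k : Nat) (q : Int), μ q ≤ k → pvNd n q → pvRoot n P' q = pvRoot n P q := by
    intro k
    induction k with
    | zero =>
      intro q hk hq
      -- μ q = 0: q must be a fixpoint of P, and q ≠ p (since μ (P p) < μ p)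
      have hqfix : P q = q := by
        rcases hg.2 q hq with h | h
        · exact h
        · omega
      have hqp : q ≠ p := by
        intro he; subst he; omega
      have : P' q = q := by rw [hP'app, if_neg hqp, hqfix]
      rw [root_of_fix this, root_of_fix hqfix]
    | succ k ih =>
      intro q hk hq
      by_cases hqp : q = p
      · subst hqp
        have hP'q : P' q = g := by rw [hP'app, if_pos rfl]
        have hgnd : pvNd n g := hg.1 _ hPp
        have h1 : pvRoot n P' q = pvRoot n P' g := by
          rw [root_step hgood htop' q hq, hP'q]
        have h2 : pvRoot n P' g = pvRoot n P g := ih g (by omega) hgnd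
        have h3 : pvRoot n P g = pvRoot n P (P q) := by
          rw [← root_step hg htop' (P q) hPp]
        have h4 : pvRoot n P (P q) = pvRoot n P q := (root_step hg htop' q hq).symm
        rw [h1, h2, h3, h4]
      · have hP'q : P' q = P q := by rw [hP'app, if_neg hqp]
        by_cases hqfix : P q = q
        · have : P' q = q := by rw [hP'q, hqfix]
          rw [root_of_fix this, root_of_fix hqfix]
        · have hlt' : μ (P q) < μ q := (hg.2 q hq).resolve_left hqfix
          have h1 : pvRoot n P' q = pvRoot n P' (P q) := by
            rw [root_step hgood htop' q hq, hP'q]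
          rw [h1, ih (P q) (by omega) (hg.1 q hq), ← root_step hg htop' q hq]
  exact fun q hq => main (μ q) q le_rfl hq

-- linking two roots: new roots
lemma link_spec {n : Int} {μ μ' : Int → Nat} {P : Int → Int} (hg : pvGoodP n μ P)
    {r1 r2 : Int} (hr2 : pvNd n r2)
    (hf1 : P r1 = r1) (hf2 : P r2 = r2) (hne : r1 ≠ r2)
    (hgood' : pvGoodP n μ' (Function.update P r2 r1))
    (htop : ∀ q, pvNd n q → μ q < n.toNat)
    (htop' : ∀ q, pvNd n q → μ' q < n.toNat) :
    ∀ q, pvNd n q → pvRoot n (Function.update P r2 r1) q =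
      (if pvRoot n P q = r2 then r1 else pvRoot n P q) := by
  set P' := Function.update P r2 r1 with hP'def
  have hP'app : ∀ q, P' q = if q = r2 then r1 else P q := fun q => Function.update_apply P r2 r1 q
  have hroot_r1 : pvRoot n P' r1 = r1 := by
    apply root_of_fix; rw [hP'app, if_neg hne, hf1]
  have main : ∀ (k : Nat) (q : Int), μ q ≤ k → pvNd n q →
      pvRoot n P' q = (if pvRoot n P q = r2 then r1 else pvRoot n P q) := by
    intro k
    induction k with
    | zero =>
      intro q hk hq
      have hqfix : P q = q := by
        rcases hg.2 q hq with h | h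
        · exact h
        · omega
      rw [root_of_fix hqfix]
      by_cases hqr2 : q = r2
      · subst hqr2
        rw [if_pos rfl]
        have : P' q = r1 := by rw [hP'app, if_pos rfl]
        rw [root_step hgood' htop' q hq, this, hroot_r1]
      · rw [if_neg hqr2]
        apply root_of_fix
        rw [hP'app, if_neg hqr2, hqfix]
    | succ k ih =>
      intro q hk hq
      by_cases hqr2 : q = r2
      · subst hqr2
        rw [root_of_fix hf2, if_pos rfl]
        have : P' q = r1 := by rw [hP'app, if_pos rfl]
        rw [root_step hgood' htop' q hq, this, hroot_r1]
      · by_cases hqfix : P q = q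
        · rw [root_of_fix hqfix, if_neg hqr2]
          apply root_of_fix
          rw [hP'app, if_neg hqr2, hqfix]
        · have hlt : μ (P q) < μ q := (hg.2 q hq).resolve_left hqfix
          have hP'q : P' q = P q := by rw [hP'app, if_neg hqr2]
          rw [root_step hgood' htop' q hq, hP'q, ih (P q) (by omega) (hg.1 q hq),
            ← root_step hg htop q hq]
  exact fun q hq => main (μ q) q le_rfl hq

lemma mu_root_le {n : Int} {μ : Int → Nat} {P : Int → Int} (hg : pvGoodP n μ P)
    (htop : ∀ q, pvNd n q → μ q < n.toNat) :
    ∀ (k : Nat) (p : Int), μ p ≤ k → pvNd n p → μ (pvRoot n P p) ≤ μ p := by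
  intro k
  induction k with
  | zero =>
    intro p hk hp
    rcases hg.2 p hp with hfix | hlt
    · rw [root_of_fix hfix]
    · omega
  | succ k ih =>
    intro p hk hp
    rcases hg.2 p hp with hfix | hlt
    · rw [root_of_fix hfix]
    · rw [root_step hg htop p hp]
      have := ih (P p) (by omega) (hg.1 p hp)
      omega

lemma root_eq_self_imp_fix {n : Int} {μ : Int → Nat} {P : Int → Int} (hg : pvGoodP n μ P)
    (htop : ∀ q, pvNd n q → μ q < n.toNat) (p : Int) (hp : pvNd n p)
    (h : pvRoot n P p = p) : P p = p := by
  by_cases hfix : P p = p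
  · exact hfix
  · exfalso
    have hlt : μ (P p) < μ p := (hg.2 p hp).resolve_left hfix
    have h1 : pvRoot n P p = pvRoot n P (P p) := root_step hg htop p hp
    have h2 : μ (pvRoot n P (P p)) ≤ μ (P p) := mu_root_le hg htop (μ (P p)) (P p) le_rfl (hg.1 p hp)
    rw [← h1, h] at h2
    omega

def pvCnt (n : Int) (C : Int → Int) (c : Int) : Nat :=
  ((PySem.List.pyRange 0 n 1).filter (fun j => C j = c)).length

lemma cnt_le {n : Int} (C : Int → Int) (c : Int) : pvCnt n C c ≤ n.toNat := by
  unfold pvCnt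
  have h1 := List.length_filter_le (fun j => decide (C j = c)) (PySem.List.pyRange 0 n 1)
  have h2 : (PySem.List.pyRange 0 n 1).length = n.toNat := by
    rw [PySem.List.length_pyRange_one]; omega
  omega

lemma cnt_pos {n : Int} (C : Int → Int) {i : Int} (hi : pvNd n i) : 0 < pvCnt n C (C i) := by
  unfold pvCnt
  have hmem : i ∈ (PySem.List.pyRange 0 n 1).filter (fun j => C j = C i) := by
    rw [List.mem_filter]
    exact ⟨(PySem.List.mem_pyRange_one).mpr ⟨hi.1, hi.2⟩, by simp⟩
  exact List.length_pos_of_mem hmem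

lemma cnt_merge_list (C : Int → Int) (c1 c2 : Int) (hne : c1 ≠ c2) (L : List Int) :
    (L.countP (fun j => (if C j = c2 then c1 else C j) = c1)) =
      L.countP (fun j => C j = c1) + L.countP (fun j => C j = c2) := by
  induction L with
  | nil => simp
  | cons x t ih =>
    simp only [List.countP_cons, ih]
    by_cases h2 : C x = c2 <;> by_cases h1 : C x = c1 <;> simp [h1, h2, hne, Ne.symm hne] <;> omega

lemma cnt_merge {n : Int} (C : Int → Int) (c1 c2 : Int) (hne : c1 ≠ c2) :
    pvCnt n (fun i => if C i = c2 then c1 else C i) c1 = pvCnt n C c1 + pvCnt n C c2 := by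
  unfold pvCnt
  rw [← List.countP_eq_length_filter, ← List.countP_eq_length_filter, ← List.countP_eq_length_filter]
  exact cnt_merge_list C c1 c2 hne _

lemma cnt_keep {n : Int} (C : Int → Int) {c1 c2 c : Int} (h1 : c ≠ c1) (h2 : c ≠ c2) :
    pvCnt n (fun i => if C i = c2 then c1 else C i) c = pvCnt n C c := by
  unfold pvCnt
  congr 1
  apply List.filter_congr
  intro j _
  by_cases hj : C j = c2
  · simp [hj]
    omega
  · simp [hj]

def pvInv (n : Int) (P C : Int → Int) : Prop :=
  ∃ μ, pvGoodP n μ P ∧ (∀ i, pvNd n i → μ i < pvCnt n C (C i)) ∧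
    (∀ i j, pvNd n i → pvNd n j → (pvRoot n P i = pvRoot n P j ↔ C i = C j))

lemma merge_spec {n : Int} {μ : Int → Nat} {P C : Int → Int} {rc rp cc cp c1 c2 : Int}
    (hg : pvGoodP n μ P)
    (hbound : ∀ i, pvNd n i → μ i < pvCnt n C (C i))
    (hpart : ∀ i j, pvNd n i → pvNd n j → (pvRoot n P i = pvRoot n P j ↔ C i = C j))
    (hrc : pvNd n rc) (hrp : pvNd n rp)
    (hfc : P rc = rc) (hfp : P rp = rp) (hrne : rc ≠ rp)
    (hcc : ∀ i, pvNd n i → (pvRoot n P i = rc ↔ C i = cc))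
    (hcp : ∀ i, pvNd n i → (pvRoot n P i = rp ↔ C i = cp))
    (hset : (cc = c1 ∧ cp = c2) ∨ (cc = c2 ∧ cp = c1))
    (hcne : c1 ≠ c2) :
    pvInv n (Function.update P rc rp) (fun i => if C i = c2 then c1 else C i) := by
  have htop : ∀ q, pvNd n q → μ q < n.toNat :=
    fun q hq => lt_of_lt_of_le (hbound q hq) (cnt_le C (C q))
  have hccp : cc ≠ cp := by rcases hset with ⟨e1, e2⟩ | ⟨e1, e2⟩ <;> omega
  have hCrc : C rc = cc := (hcc rc hrc).mp (root_of_fix hfc)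
  have hCrp : C rp = cp := (hcp rp hrp).mp (root_of_fix hfp)
  have hlabel_step : ∀ q, pvNd n q → C (P q) = C q := by
    intro q hq
    exact (hpart (P q) q (hg.1 q hq) hq).mp (root_step hg htop q hq).symm
  set K := pvCnt n C cp with hK
  have hμrp : μ rp < K := by rw [hK, ← hCrp]; exact hbound rp hrp
  set μ' : Int → Nat := fun i => if C i = cc then μ i + K else μ i with hμ'
  set P' := Function.update P rc rp with hP'
  have hP'app : ∀ q, P' q = if q = rc then rp else P q := fun q => Function.update_apply P rc rp q
  have hμ'app : ∀ i, μ' i = if C i = cc then μ i + K else μ i := fun _ => rfl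
  have hgood' : pvGoodP n μ' P' := by
    constructor
    · intro q hq
      rw [hP'app q]
      split
      · exact hrp
      · exact hg.1 q hq
    · intro q hq
      by_cases hqrc : q = rc
      · subst hqrc
        right
        rw [hP'app, if_pos rfl, hμ'app, hμ'app, hCrc, if_pos rfl, hCrp,
          if_neg (Ne.symm hccp)]
        omega
      · rw [hP'app, if_neg hqrc]
        rcases hg.2 q hq with hfix | hlt
        · exact Or.inl hfix
        · right
          rw [hμ'app, hμ'app, hlabel_step q hq]
          split <;> omega
  have hbound' : ∀ i, pvNd n i →
      μ' i < pvCnt n (fun j => if C j = c2 then c1 else C j)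
        ((fun j => if C j = c2 then c1 else C j) i) := by
    set C2 : Int → Int := fun j => if C j = c2 then c1 else C j with hC2
    intro i hi
    have hKi := hbound i hi
    have hmrg : pvCnt n C2 c1 = pvCnt n C c1 + pvCnt n C c2 := cnt_merge C c1 c2 hcne
    have hC2i : C2 i = (if C i = c2 then c1 else C i) := rfl
    have hKcp : K = pvCnt n C cp := hK
    show μ' i < pvCnt n C2 (C2 i)
    by_cases h2 : C i = c2
    · have e : C2 i = c1 := by rw [hC2i, if_pos h2]
      rw [e, hmrg]
      rw [h2] at hKi
      by_cases h1 : c2 = cc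
      · have eμ : μ' i = μ i + K := by rw [hμ'app i, h2, if_pos h1]
        have ecp : cp = c1 := by rcases hset with ⟨e1, e2⟩ | ⟨e1, e2⟩ <;> omega
        rw [eμ, hKcp, ecp]
        omega
      · have eμ : μ' i = μ i := by rw [hμ'app i, h2, if_neg h1]
        rw [eμ]
        omega
    · have e : C2 i = C i := by rw [hC2i, if_neg h2]
      rw [e]
      by_cases h3 : C i = c1
      · rw [h3, hmrg]
        rw [h3] at hKi
        rcases hset with ⟨e1, e2⟩ | ⟨e1, e2⟩
        · have eμ : μ' i = μ i + K := by rw [hμ'app i, h3, if_pos (by omega : c1 = cc)]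
          rw [eμ, hKcp, e2]
          omega
        · have eμ : μ' i = μ i := by rw [hμ'app i, h3, if_neg (by omega : ¬ c1 = cc)]
          rw [eμ]
          omega
      · have hk : pvCnt n C2 (C i) = pvCnt n C (C i) := cnt_keep C h3 h2
        have eμ : μ' i = μ i := by rw [hμ'app i, if_neg (by omega : ¬ C i = cc)]
        rw [hk, eμ]
        exact hKi
  have htop' : ∀ q, pvNd n q → μ' q < n.toNat :=
    fun q hq => lt_of_lt_of_le (hbound' q hq) (cnt_le _ _)
  have hlink := link_spec (μ' := μ') hg hrc hfp hfc (Ne.symm hrne) hgood' htop htop'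
  refine ⟨μ', hgood', hbound', ?_⟩
  intro i j hi hj
  rw [hlink i hi, hlink j hj]
  have hCi := hcc i hi
  have hCj := hcc j hj
  have hDi := hcp i hi
  have hDj := hcp j hj
  by_cases hri : pvRoot n P i = rc <;> by_cases hrj : pvRoot n P j = rc
  · have f1 : C i = cc := hCi.mp hri
    have f2 : C j = cc := hCj.mp hrj
    simp only [if_pos hri, if_pos hrj]
    constructor
    · intro _
      rcases hset with ⟨e1, e2⟩ | ⟨e1, e2⟩ <;> split_ifs <;> omega
    · intro _
      trivial
  · have f1 : C i = cc := hCi.mp hri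
    have f2 : C j ≠ cc := fun h => hrj (hCj.mpr h)
    simp only [if_pos hri, if_neg hrj]
    rw [show (rp = pvRoot n P j) ↔ (pvRoot n P j = rp) from eq_comm, hDj]
    rcases hset with ⟨e1, e2⟩ | ⟨e1, e2⟩ <;> split_ifs <;> omega
  · have f1 : C i ≠ cc := fun h => hri (hCi.mpr h)
    have f2 : C j = cc := hCj.mp hrj
    simp only [if_neg hri, if_pos hrj]
    rw [hDi]
    rcases hset with ⟨e1, e2⟩ | ⟨e1, e2⟩ <;> split_ifs <;> omega
  · have f1 : C i ≠ cc := fun h => hri (hCi.mpr h)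
    have f2 : C j ≠ cc := fun h => hrj (hCj.mpr h)
    simp only [if_neg hri, if_neg hrj]
    rw [hpart i j hi hj]
    rcases hset with ⟨e1, e2⟩ | ⟨e1, e2⟩ <;> split_ifs <;> omega

lemma PD_insert (d : Std.HashMap Int Int) (k v : Int) :
    pvPD (d.insert k v) = Function.update (pvPD d) k v := by
  funext i
  simp only [pvPD, Std.HashMap.getD_insert, beq_iff_eq, Function.update_apply]
  split_ifs <;> omega

lemma mu_gp {n : Int} {μ : Int → Nat} {P : Int → Int} (hg : pvGoodP n μ P)
    {p : Int} (hp : pvNd n p) (hne : P p ≠ p) : μ (P (P p)) < μ p := by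
  have h1 : μ (P p) < μ p := (hg.2 p hp).resolve_left hne
  rcases hg.2 (P p) (hg.1 p hp) with h | h
  · rw [h]; omega
  · omega

lemma find_go_spec {n : Int} {μ : Int → Nat} :
    ∀ (fuel : Nat) (p : Int) (par : Std.HashMap Int Int),
      pvGoodP n μ (pvPD par) → (∀ q, pvNd n q → μ q < n.toNat) → pvNd n p → μ p < fuel →
      (pvFindGo fuel p par).1 = pvRoot n (pvPD par) p ∧
      pvGoodP n μ (pvPD (pvFindGo fuel p par).2) ∧
      (∀ q, pvNd n q → pvRoot n (pvPD (pvFindGo fuel p par).2) q = pvRoot n (pvPD par) q) := by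
  intro fuel
  induction fuel with
  | zero => intro p par _ _ _ hf; omega
  | succ f ih =>
    intro p par hg htop hp hf
    by_cases hc : p = (par.getD p 0)
    · have hfix : pvPD par p = p := hc.symm
      simp only [pvFindGo, if_pos hc]
      exact ⟨(root_of_fix hfix).symm, hg, fun q _ => trivial⟩
    · have hne : pvPD par p ≠ p := fun h => hc h.symm
      simp only [pvFindGo, if_neg hc]
      set P := pvPD par with hPdef
      set g := par.getD (par.getD p 0) 0 with hgdef
      have hgP : g = P (P p) := rfl
      have hμg : μ g < μ p := by rw [hgP]; exact mu_gp hg hp hne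
      have hupd := upd_spec hg htop hp hne
      have hPD : pvPD (par.insert p g) = Function.update P p (P (P p)) := by
        rw [PD_insert, hgP]
      have hgood' : pvGoodP n μ (pvPD (par.insert p g)) := by rw [hPD]; exact hupd.1
      have hnd_g : pvNd n g := by rw [hgP]; exact hg.1 _ (hg.1 p hp)
      have hrec := ih g (par.insert p g) hgood' htop hnd_g (by omega)
      refine ⟨?_, hrec.2.1, ?_⟩
      · rw [hrec.1]
        have h1 : pvRoot n (pvPD (par.insert p g)) g = pvRoot n P g := by
          rw [hPD]; exact hupd.2 g hnd_g
        rw [h1, hgP]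
        have h2 : pvRoot n P p = pvRoot n P (P p) := root_step hg htop p hp
        have h3 : pvRoot n P (P p) = pvRoot n P (P (P p)) := root_step hg htop (P p) (hg.1 p hp)
        rw [← h3, ← h2]
      · intro q hq
        rw [hrec.2.2 q hq]
        rw [hPD]
        exact hupd.2 q hq

lemma union_spec {n : Int} {μ : Int → Nat} {C : Int → Int} (par rank : Std.HashMap Int Int)
    {a b : Int} (ha : pvNd n a) (hb : pvNd n b)
    (hg : pvGoodP n μ (pvPD par))
    (hbound : ∀ i, pvNd n i → μ i < pvCnt n C (C i))
    (hpart : ∀ i j, pvNd n i → pvNd n j →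
      (pvRoot n (pvPD par) i = pvRoot n (pvPD par) j ↔ C i = C j)) :
    ((C a = C b) → (pvUnion par rank a b n.toNat).1 = false ∧
      pvInv n (pvPD (pvUnion par rank a b n.toNat).2.1) C) ∧
    ((C a ≠ C b) → (pvUnion par rank a b n.toNat).1 = true ∧
      pvInv n (pvPD (pvUnion par rank a b n.toNat).2.1)
        (fun i => if C i = C b then C a else C i)) := by
  set P := pvPD par with hPdef
  have htop : ∀ q, pvNd n q → μ q < n.toNat :=
    fun q hq => lt_of_lt_of_le (hbound q hq) (cnt_le C (C q))
  have hfind1 := find_go_spec n.toNat (par.getD a 0) par hg htop (hg.1 a ha) (htop _ (hg.1 a ha))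
  set q1 := pvFindGo n.toNat (par.getD a 0) par with hq1
  set P1 := pvPD q1.2 with hP1
  have hp1 : q1.1 = pvRoot n P a := by
    rw [hfind1.1]
    exact (root_step hg htop a ha).symm
  have hgood1 : pvGoodP n μ P1 := hfind1.2.1
  have hpres1 : ∀ q, pvNd n q → pvRoot n P1 q = pvRoot n P q := hfind1.2.2
  have hfind2 := find_go_spec n.toNat (q1.2.getD b 0) q1.2 hgood1 htop (hgood1.1 b hb)
    (htop _ (hgood1.1 b hb))
  set q2 := pvFindGo n.toNat (q1.2.getD b 0) q1.2 with hq2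
  set P2 := pvPD q2.2 with hP2
  have hp2 : q2.1 = pvRoot n P b := by
    rw [hfind2.1]
    exact ((root_step hgood1 htop b hb).symm.trans (hpres1 b hb))
  have hgood2 : pvGoodP n μ P2 := hfind2.2.1
  have hpres2 : ∀ q, pvNd n q → pvRoot n P2 q = pvRoot n P q := by
    intro q hq
    rw [hfind2.2.2 q hq, hpres1 q hq]
  have hpart2 : ∀ i j, pvNd n i → pvNd n j → (pvRoot n P2 i = pvRoot n P2 j ↔ C i = C j) := by
    intro i j hi hj
    rw [hpres2 i hi, hpres2 j hj]
    exact hpart i j hi hj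
  have hU : pvUnion par rank a b n.toNat =
      (if q1.1 = q2.1 then (false, q2.2, rank)
       else if rank.getD q1.1 0 > rank.getD q2.1 0 then (true, q2.2.insert q2.1 q1.1, rank)
       else if rank.getD q2.1 0 > rank.getD q1.1 0 then (true, q2.2.insert q1.1 q2.1, rank)
       else (true, q2.2.insert q2.1 q1.1, rank.insert q1.1 (rank.getD q1.1 0 + 1))) := rfl
  have hra : pvNd n (pvRoot n P a) ∧ P (pvRoot n P a) = pvRoot n P a := root_spec hg htop a ha
  have hrb : pvNd n (pvRoot n P b) ∧ P (pvRoot n P b) = pvRoot n P b := root_spec hg htop b hb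
  -- roots are fixpoints of P2 as well
  have hfix2 : ∀ r, pvNd n r → P r = r → P2 r = r := by
    intro r hr hfix
    apply root_eq_self_imp_fix hgood2 htop r hr
    rw [hpres2 r hr]
    exact root_of_fix hfix
  have hfa2 : P2 (pvRoot n P a) = pvRoot n P a := hfix2 _ hra.1 hra.2
  have hfb2 : P2 (pvRoot n P b) = pvRoot n P b := hfix2 _ hrb.1 hrb.2
  have hcc_a : ∀ i, pvNd n i → (pvRoot n P2 i = pvRoot n P a ↔ C i = C a) := by
    intro i hi
    rw [hpres2 i hi]
    exact hpart i a hi ha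
  have hcc_b : ∀ i, pvNd n i → (pvRoot n P2 i = pvRoot n P b ↔ C i = C b) := by
    intro i hi
    rw [hpres2 i hi]
    exact hpart i b hi hb
  constructor
  · intro hCeq
    have heq : q1.1 = q2.1 := by
      rw [hp1, hp2]
      exact (hpart a b ha hb).mpr hCeq
    rw [hU, if_pos heq]
    exact ⟨rfl, ⟨μ, hgood2, hbound, hpart2⟩⟩
  · intro hCne
    have hne : q1.1 ≠ q2.1 := by
      rw [hp1, hp2]
      intro h
      exact hCne ((hpart a b ha hb).mp h)
    have hrne : pvRoot n P b ≠ pvRoot n P a := by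
      rw [hp1, hp2] at hne
      exact fun h => hne h.symm
    -- merging child root r under parent root r' matches relabelling C b → C a
    have hmerge1 : pvInv n (pvPD (q2.2.insert q2.1 q1.1))
        (fun i => if C i = C b then C a else C i) := by
      rw [hp1, hp2, PD_insert]
      exact merge_spec hgood2 hbound hpart2 hrb.1 hra.1 hfb2 hfa2 hrne
        hcc_b hcc_a (Or.inr ⟨rfl, rfl⟩) hCne
    have hmerge2 : pvInv n (pvPD (q2.2.insert q1.1 q2.1))
        (fun i => if C i = C b then C a else C i) := by
      rw [hp1, hp2, PD_insert]
      exact merge_spec hgood2 hbound hpart2 hra.1 hrb.1 hfa2 hfb2 (fun h => hrne h.symm)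
        hcc_a hcc_b (Or.inl ⟨rfl, rfl⟩) hCne
    rw [hU, if_neg hne]
    by_cases hb1 : rank.getD q1.1 0 > rank.getD q2.1 0
    · rw [if_pos hb1]
      exact ⟨rfl, hmerge1⟩
    · rw [if_neg hb1]
      by_cases hb2 : rank.getD q2.1 0 > rank.getD q1.1 0
      · rw [if_pos hb2]
        exact ⟨rfl, hmerge2⟩
      · rw [if_neg hb2]
        exact ⟨rfl, hmerge1⟩

lemma contains_foldl_insert (g : Int × Int → Int) :
    ∀ (l : List (Int × Int)) (d : Std.HashMap Int Int) (k : Int),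
      (l.foldl (fun d p => d.insert p.1 (g p)) d).contains k =
        (decide (k ∈ l.map Prod.fst) || d.contains k) := by
  intro l
  induction l with
  | nil => simp
  | cons p t ih =>
    intro d k
    simp only [List.foldl_cons, ih, List.map_cons, List.mem_cons, Std.HashMap.contains_insert]
    by_cases h1 : p.1 = k
    · simp [h1]
    · have h1' : (p.1 == k) = false := beq_eq_false_iff_ne.mpr h1
      have h2 : ¬ (k = p.1) := fun h => h1 h.symm
      simp [h1', h2]

lemma getD_foldl_insert_notmem (g : Int × Int → Int) :
    ∀ (l : List (Int × Int)) (d : Std.HashMap Int Int) (k : Int), k ∉ l.map Prod.fst →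
      (l.foldl (fun d p => d.insert p.1 (g p)) d).getD k 0 = d.getD k 0 := by
  intro l
  induction l with
  | nil => intro d k _; rfl
  | cons p t ih =>
    intro d k hk
    simp only [List.map_cons, List.mem_cons, not_or] at hk
    simp only [List.foldl_cons, ih _ _ hk.2, Std.HashMap.getD_insert, beq_iff_eq]
    rw [if_neg (show ¬ (p.1 = k) from fun h => hk.1 h.symm)]

lemma getD_foldl_insert_mem (g : Int × Int → Int) :
    ∀ (l : List (Int × Int)) (d : Std.HashMap Int Int) (p : Int × Int),
      (l.map Prod.fst).Nodup → p ∈ l →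
      (l.foldl (fun d p => d.insert p.1 (g p)) d).getD p.1 0 = g p := by
  intro l
  induction l with
  | nil => intro d p _ hp; cases hp
  | cons q t ih =>
    intro d p hnd hp
    simp only [List.map_cons, List.nodup_cons] at hnd
    rcases List.mem_cons.mp hp with rfl | hpt
    · simp only [List.foldl_cons]
      rw [getD_foldl_insert_notmem g t _ p.1 hnd.1]
      simp
    · exact ih _ p hnd.2 hpt

lemma keys_nodup_toList (comp : Std.HashMap Int Int) : (comp.toList.map Prod.fst).Nodup := by
  have h := Std.HashMap.distinct_keys_toList (m := comp)
  refine List.Pairwise.map _ ?_ h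
  intro a b hab
  simpa using hab

lemma getD_relabel (comp : Std.HashMap Int Int) (c1 c2 i : Int)
    (hc : comp.contains i = true) :
    (pvRelabel comp c1 c2).getD i 0 = if comp.getD i 0 = c2 then c1 else comp.getD i 0 := by
  have hsome : comp[i]?.isSome := by
    rw [← Std.HashMap.contains_eq_isSome_getElem?, hc]
  obtain ⟨v, hv⟩ := Option.isSome_iff_exists.mp hsome
  have hmem : (i, v) ∈ comp.toList := Std.HashMap.mem_toList_iff_getElem?_eq_some.mpr hv
  have h := getD_foldl_insert_mem (fun p => if p.2 = c2 then c1 else p.2) comp.toList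
    (∅ : Std.HashMap Int Int) (i, v) (keys_nodup_toList comp) hmem
  have hgd : comp.getD i 0 = v := by rw [Std.HashMap.getD_eq_getD_getElem?, hv]; rfl
  rw [hgd]
  exact h

lemma contains_relabel (comp : Std.HashMap Int Int) (c1 c2 i : Int) :
    (pvRelabel comp c1 c2).contains i = comp.contains i := by
  unfold pvRelabel
  rw [contains_foldl_insert]
  rw [Std.HashMap.map_fst_toList_eq_keys]
  have h : (i ∈ comp.keys) ↔ comp.contains i = true := by
    rw [Std.HashMap.mem_keys, Std.HashMap.mem_iff_contains]
  by_cases hc : comp.contains i = true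
  · simp [h.mpr hc, hc]
  · have hnm : ¬ (i ∈ comp.keys) := fun hm => hc (h.mp hm)
    have hcf : comp.contains i = false := by
      cases hcv : comp.contains i
      · rfl
      · exact absurd hcv hc
    simp [hnm, hcf]

lemma contains_foldl_insert_id :
    ∀ (l : List Int) (d : Std.HashMap Int Int) (k : Int),
      (l.foldl (fun d i => d.insert i i) d).contains k = (decide (k ∈ l) || d.contains k) := by
  intro l
  induction l with
  | nil => simp
  | cons x t ih =>
    intro d k
    simp only [List.foldl_cons, ih, List.mem_cons, Std.HashMap.contains_insert]
    by_cases h1 : x = k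
    · simp [h1]
    · have h1' : (x == k) = false := beq_eq_false_iff_ne.mpr h1
      have h2 : ¬ (k = x) := fun h => h1 h.symm
      simp [h1', h2]

lemma getD_foldl_insert_id_notmem :
    ∀ (l : List Int) (d : Std.HashMap Int Int) (k : Int), k ∉ l →
      (l.foldl (fun d i => d.insert i i) d).getD k 0 = d.getD k 0 := by
  intro l
  induction l with
  | nil => intro d k _; rfl
  | cons x t ih =>
    intro d k hk
    simp only [List.mem_cons, not_or] at hk
    simp only [List.foldl_cons, ih _ _ hk.2, Std.HashMap.getD_insert, beq_iff_eq]
    rw [if_neg (show ¬ (x = k) from fun h => hk.1 h.symm)]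

lemma getD_foldl_insert_id_mem :
    ∀ (l : List Int) (d : Std.HashMap Int Int) (k : Int), l.Nodup → k ∈ l →
      (l.foldl (fun d i => d.insert i i) d).getD k 0 = k := by
  intro l
  induction l with
  | nil => intro d k _ hk; cases hk
  | cons x t ih =>
    intro d k hnd hk
    rcases List.mem_cons.mp hk with rfl | hkt
    · simp only [List.foldl_cons]
      rw [getD_foldl_insert_id_notmem t _ k (List.nodup_cons.mp hnd).1]
      simp
    · exact ih _ k (List.nodup_cons.mp hnd).2 hkt

lemma init_contains (n : Int) {i : Int} (hi : pvNd n i) :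
    ((PySem.List.pyRange 0 n 1).foldl (fun (d : Std.HashMap Int Int) i => d.insert i i)
      (∅ : Std.HashMap Int Int)).contains i = true := by
  rw [contains_foldl_insert_id]
  simp only [Bool.or_eq_true, decide_eq_true_eq]
  exact Or.inl ((PySem.List.mem_pyRange_one).mpr ⟨hi.1, hi.2⟩)

lemma init_getD (n : Int) {i : Int} (hi : pvNd n i) :
    ((PySem.List.pyRange 0 n 1).foldl (fun (d : Std.HashMap Int Int) i => d.insert i i)
      (∅ : Std.HashMap Int Int)).getD i 0 = i :=
  getD_foldl_insert_id_mem _ _ i (PySem.List.nodup_pyRange_one 0 n)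
    ((PySem.List.mem_pyRange_one).mpr ⟨hi.1, hi.2⟩)

lemma inv_congr {n : Int} {P C C' : Int → Int} (h : ∀ i, pvNd n i → C i = C' i) :
    pvInv n P C → pvInv n P C' := by
  rintro ⟨μ, hg, hbound, hpart⟩
  have hcnt : ∀ c, pvCnt n C c = pvCnt n C' c := by
    intro c
    unfold pvCnt
    congr 1
    apply List.filter_congr
    intro j hj
    have hjnd : pvNd n j := by
      have := (PySem.List.mem_pyRange_one).mp hj
      exact ⟨this.1, this.2⟩
    rw [h j hjnd]
  refine ⟨μ, hg, ?_, ?_⟩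
  · intro i hi
    rw [← hcnt, ← h i hi]
    exact hbound i hi
  · intro i j hi hj
    rw [← h i hi, ← h j hj]
    exact hpart i j hi hj

lemma loop_eq {n : Int} : ∀ (L : List (List Int)) (par rank comp : Std.HashMap Int Int) (gc : Int),
    (∀ l ∈ L, l.length = 3 ∧ 0 ≤ l.getD 1 0 ∧ l.getD 1 0 < n ∧ 0 ≤ l.getD 2 0 ∧ l.getD 2 0 < n) →
    (∀ i, pvNd n i → comp.contains i = true) →
    pvInv n (pvPD par) (pvPD comp) →
    pvLoopA n.toNat L par rank gc = pvLoopB L comp gc := by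
  intro L
  induction L with
  | nil => intro par rank comp gc _ _ _; rfl
  | cons l rest ih =>
    intro par rank comp gc hlogs hcont hinv
    obtain ⟨hlen, ha0, ha1, hb0, hb1⟩ := hlogs l (List.mem_cons_self)
    obtain ⟨t, a, b, rfl⟩ : ∃ t a b, l = [t, a, b] := by
      match l, hlen with
      | [t, a, b], _ => exact ⟨t, a, b, rfl⟩
    have ha : pvNd n a := ⟨ha0, ha1⟩
    have hb : pvNd n b := ⟨hb0, hb1⟩
    have hrest : ∀ l' ∈ rest, l'.length = 3 ∧ 0 ≤ l'.getD 1 0 ∧ l'.getD 1 0 < n ∧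
        0 ≤ l'.getD 2 0 ∧ l'.getD 2 0 < n := fun l' hl' => hlogs l' (List.mem_cons_of_mem _ hl')
    obtain ⟨μ, hg, hbound, hpart⟩ := hinv
    have huspec := union_spec (C := pvPD comp) par rank ha hb hg hbound hpart
    simp only [pvLoopA, pvLoopB]
    by_cases hC : pvPD comp a = pvPD comp b
    · have hu := huspec.1 hC
      have hCg : comp.getD a 0 = comp.getD b 0 := hC
      rw [hu.1]
      simp only [if_neg (by decide : ¬ (false = true))]
      rw [if_neg (show ¬ (comp.getD a 0 ≠ comp.getD b 0) from fun h => h hCg)]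
      by_cases hgc : gc = 1
      · rw [if_pos hgc, if_pos hgc]
      · rw [if_neg hgc, if_neg hgc]
        exact ih _ _ comp gc hrest hcont hu.2
    · have hu := huspec.2 hC
      have hCg : ¬ (comp.getD a 0 = comp.getD b 0) := hC
      rw [hu.1]
      simp only [if_true]
      rw [if_pos (show (comp.getD a 0 ≠ comp.getD b 0) from hCg)]
      by_cases hgc : gc - 1 = 1
      · rw [if_pos hgc, if_pos hgc]
      · rw [if_neg hgc, if_neg hgc]
        have hinv' : pvInv n (pvPD (pvUnion par rank a b n.toNat).2.1)
            (pvPD (pvRelabel comp (comp.getD a 0) (comp.getD b 0))) := by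
          apply inv_congr (C := fun i => if pvPD comp i = pvPD comp b then pvPD comp a else pvPD comp i)
          · intro i hi
            show _ = (pvRelabel comp (comp.getD a 0) (comp.getD b 0)).getD i 0
            rw [getD_relabel comp _ _ i (hcont i hi)]
            rfl
          · exact hu.2
        apply ih _ _ _ _ hrest
        · intro i hi
          rw [contains_relabel comp _ _ i]
          exact hcont i hi
        · exact hinv'

lemma init_inv (n : Int) :
    pvInv n (pvPD ((PySem.List.pyRange 0 n 1).foldl
        (fun (d : Std.HashMap Int Int) i => d.insert i i) (∅ : Std.HashMap Int Int)))
      (pvPD ((PySem.List.pyRange 0 n 1).foldl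
        (fun (d : Std.HashMap Int Int) i => d.insert i i) (∅ : Std.HashMap Int Int))) := by
  set d0 := (PySem.List.pyRange 0 n 1).foldl
    (fun (d : Std.HashMap Int Int) i => d.insert i i) (∅ : Std.HashMap Int Int) with hd0
  have hid : ∀ i, pvNd n i → pvPD d0 i = i := fun i hi => init_getD n hi
  refine ⟨fun _ => 0, ⟨?_, ?_⟩, ?_, ?_⟩
  · intro q hq
    rw [hid q hq]
    exact hq
  · intro q hq
    exact Or.inl (hid q hq)
  · intro i hi
    exact cnt_pos _ hi
  · intro i j hi hj
    rw [root_of_fix (hid i hi), root_of_fix (hid j hj), hid i hi, hid j hj]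

lemma init_pair (n : Int) :
    (PySem.List.pyRange 0 n 1).foldl
        (fun (pr : Std.HashMap Int Int × Std.HashMap Int Int) i =>
          (pr.1.insert i i, pr.2.insert i 1))
        ((∅ : Std.HashMap Int Int), (∅ : Std.HashMap Int Int)) =
      ((PySem.List.pyRange 0 n 1).foldl (fun (d : Std.HashMap Int Int) i => d.insert i i)
          (∅ : Std.HashMap Int Int),
        (PySem.List.pyRange 0 n 1).foldl (fun (d : Std.HashMap Int Int) i => d.insert i 1)
          (∅ : Std.HashMap Int Int)) :=
  PySem.List.foldl_prod_mk (f := fun (d : Std.HashMap Int Int) (i : Int) => d.insert i i)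
    (g := fun (d : Std.HashMap Int Int) (i : Int) => d.insert i 1)
    (l := PySem.List.pyRange 0 n 1) (a := (∅ : Std.HashMap Int Int)) (b := (∅ : Std.HashMap Int Int))

theorem main_eq (logs : List (List Int)) (n : Int)
    (hpre : ∀ l ∈ logs, l.length = 3 ∧ 0 ≤ l.getD 1 0 ∧ l.getD 1 0 < n ∧
      0 ≤ l.getD 2 0 ∧ l.getD 2 0 < n) :
    pvLoopA n.toNat (PySem.List.sorted logs (fun item => PySem.List.pyGetD item 0 0) false)
        ((PySem.List.pyRange 0 n 1).foldl
          (fun (pr : Std.HashMap Int Int × Std.HashMap Int Int) i =>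
            (pr.1.insert i i, pr.2.insert i 1))
          ((∅ : Std.HashMap Int Int), (∅ : Std.HashMap Int Int))).1
        ((PySem.List.pyRange 0 n 1).foldl
          (fun (pr : Std.HashMap Int Int × Std.HashMap Int Int) i =>
            (pr.1.insert i i, pr.2.insert i 1))
          ((∅ : Std.HashMap Int Int), (∅ : Std.HashMap Int Int))).2 n =
      pvLoopB (PySem.List.sorted logs (fun item => PySem.List.pyGetD item 0 0) false)
        ((PySem.List.pyRange 0 n 1).foldl (fun (d : Std.HashMap Int Int) i => d.insert i i)
          (∅ : Std.HashMap Int Int)) n := by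
  rw [init_pair n]
  apply loop_eq
  · intro l hl
    rw [PySem.List.mem_sorted] at hl
    exact hpre l hl
  · intro i hi
    exact init_contains n hi
  · exact init_inv n

-- ===== VERDICT (by name: the statement is the Claim_ definition above) =====
theorem earliestAcq_spec : Claim_equal_earliestAcq := by
  intro logs n _ hpre
  exact main_eq logs n hpre
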